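-- pv_equiv track=rewrite | github.com/MrBrantCode/unitest_baseline | mut_generate/mist_train_cf/cf_80883/solution.py | get_even_prime_and_merge
-- ===== SOURCE A (Python) =====
-- def get_even_prime_and_merge(l1: list, l2: list):
--     """Return only even prime numbers from both lists, merged and sorted in descending order."""
--
--     def is_prime(x: int):
--         """Helper function for checking primality of a number."""
--         if x < 2:
--             return False
--         for i in range(2, int(x**0.5) + 1):
--             if x % i == 0:
--                 return False
--         return True
--
--     even_prime_numbers = []
--     for num in l1+l2:  # Merge the numbers from both lists into a single for loop
--         if num == 2:  # 2 is the only even prime number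
--             even_prime_numbers.append(num)
--
--     return sorted(even_prime_numbers, reverse=True)
-- ===== SOURCE B (Python) =====
-- def get_even_prime_and_merge(l1: list, l2: list):
--     """Return only even prime numbers from both lists, merged and sorted in descending order."""
--     return [2] * (l1.count(2) + l2.count(2))
-- ===== Notes on version B (the rewrite author's own statement) =====
-- stated objective: simpler
-- what changed: Since 2 is the only even prime, B replaces the filter loop plus descending sort with a closed-form construction: count the 2s in both lists and replicate [2]*count.
import Mathlib
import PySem

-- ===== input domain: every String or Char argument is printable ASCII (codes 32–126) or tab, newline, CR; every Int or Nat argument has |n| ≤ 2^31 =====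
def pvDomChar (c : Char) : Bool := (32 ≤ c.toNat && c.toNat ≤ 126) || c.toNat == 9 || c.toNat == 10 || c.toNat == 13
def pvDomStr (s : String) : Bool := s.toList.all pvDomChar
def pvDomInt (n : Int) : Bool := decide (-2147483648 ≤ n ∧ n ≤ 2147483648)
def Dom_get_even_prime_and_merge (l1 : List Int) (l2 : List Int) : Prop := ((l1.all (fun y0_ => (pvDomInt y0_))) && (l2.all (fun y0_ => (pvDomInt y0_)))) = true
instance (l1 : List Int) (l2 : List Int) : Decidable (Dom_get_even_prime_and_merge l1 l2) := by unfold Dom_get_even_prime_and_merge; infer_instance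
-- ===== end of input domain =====

-- ===== PORT A =====
-- Port of A: loop appending each num == 2 from l1+l2, then sorted(..., reverse=True).
def get_even_prime_and_merge (l1 : List Int) (l2 : List Int) : List Int :=
  let even_prime_numbers :=
    (l1 ++ l2).foldl (fun acc num => if num == 2 then acc ++ [num] else acc) []
  PySem.List.sorted even_prime_numbers (fun x => x) true

-- ===== PORT B =====
-- Port of B: [2] * (l1.count(2) + l2.count(2)).
def get_even_prime_and_merge_alt (l1 : List Int) (l2 : List Int) : List Int :=
  List.replicate (PySem.List.count l1 2 + PySem.List.count l2 2) 2

-- ===== PRECONDITION & SPEC =====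
def Spec_get_even_prime_and_merge (l1 : List Int) (l2 : List Int) (out : List Int) : Prop := out = get_even_prime_and_merge_alt l1 l2
instance (l1 : List Int) (l2 : List Int) (out : List Int) : Decidable (Spec_get_even_prime_and_merge l1 l2 out) := by unfold Spec_get_even_prime_and_merge; infer_instance

-- ===== CLAIM (what is proved, stated in full; the proofs are below) =====
def Claim_equal_get_even_prime_and_merge : Prop := ∀ (l1 : List Int) (l2 : List Int), Dom_get_even_prime_and_merge l1 l2 → Spec_get_even_prime_and_merge l1 l2 (get_even_prime_and_merge l1 l2)

-- ===== LEMMAS AND PROOFS =====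
-- The filter loop over xs produces acc ++ replicate (count xs 2) 2.
lemma pv_loop_eq (xs : List Int) (acc : List Int) :
    xs.foldl (fun acc num => if num == 2 then acc ++ [num] else acc) acc
      = acc ++ List.replicate (xs.count 2) 2 := by
  induction xs generalizing acc with
  | nil => simp
  | cons x xs ih =>
    by_cases h : x = 2
    · subst h
      rw [List.foldl_cons, if_pos (by decide), ih, List.count_cons_self, List.replicate_succ,
        List.append_assoc, List.singleton_append]
    · rw [List.foldl_cons, if_neg (by simpa using h), ih, List.count_cons_of_ne (by simpa using h)]

-- ===== VERDICT (by name: the statement is the Claim_ definition above) =====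
theorem get_even_prime_and_merge_spec : Claim_equal_get_even_prime_and_merge := by
  intro l1 l2 _
  unfold Spec_get_even_prime_and_merge get_even_prime_and_merge get_even_prime_and_merge_alt
  rw [pv_loop_eq]
  simp only [List.nil_append]
  rw [PySem.List.sorted_rev_eq_self_of_pairwise]
  · simp [PySem.List.count, List.count_append]
  · exact List.pairwise_replicate.mpr (Or.inr le_rfl)
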